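-- pv_equiv track=rewrite | github.com/Danilka776/signature_generator | Kmeans.py | cluster_update
-- ===== SOURCE A (Python) =====
-- def cluster_update(cluster, cluster_content, k, matrix_of_similarity):
--     for i in range(k):
--         updated_parameter = cluster[i]
--         closest_centroid = 0
--         for j in range(len(cluster_content[i])):
--             transaction_number = cluster_content[i][j]
--             cur_centroid = 0
--             for m in range(len(matrix_of_similarity)):
--                 cur_centroid += matrix_of_similarity[transaction_number][m]
--             if closest_centroid < cur_centroid:
--                 closest_centroid = cur_centroid
--                 updated_parameter = transaction_number
--
--         cluster[i] = updated_parameter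
--     return cluster
-- ===== SOURCE B (Python) =====
-- def cluster_update(cluster, cluster_content, k, matrix_of_similarity):
--     # B: precompute all row sums once, then a pure argmax pass per cluster
--     # (A recomputes the row sum for every member occurrence).
--     n = len(matrix_of_similarity)
--     row_sums = [sum(row[m] for m in range(n)) for row in matrix_of_similarity]
--
--     def best(i, c):
--         b, s = c, 0
--         for tn in cluster_content[i]:
--             if s < row_sums[tn]:
--                 b, s = tn, row_sums[tn]
--         return b
--
--     cluster[:] = [best(i, c) if i < k else c for i, c in enumerate(cluster)]
--     return cluster
-- ===== Notes on version B (the rewrite author's own statement) =====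
-- stated objective: faster
-- what changed: B precomputes a table of all matrix row sums once and replaces A's fused triple loop by a pure per-cluster argmax pass expressed as an index-conditional map, so the O(N) row sum is no longer recomputed for every member occurrence.
-- outside the precondition, e.g. on cluster_update([0], [[0]], 1, [[1, 2], [3]]): A returns [0], B raises IndexError
import Mathlib
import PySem

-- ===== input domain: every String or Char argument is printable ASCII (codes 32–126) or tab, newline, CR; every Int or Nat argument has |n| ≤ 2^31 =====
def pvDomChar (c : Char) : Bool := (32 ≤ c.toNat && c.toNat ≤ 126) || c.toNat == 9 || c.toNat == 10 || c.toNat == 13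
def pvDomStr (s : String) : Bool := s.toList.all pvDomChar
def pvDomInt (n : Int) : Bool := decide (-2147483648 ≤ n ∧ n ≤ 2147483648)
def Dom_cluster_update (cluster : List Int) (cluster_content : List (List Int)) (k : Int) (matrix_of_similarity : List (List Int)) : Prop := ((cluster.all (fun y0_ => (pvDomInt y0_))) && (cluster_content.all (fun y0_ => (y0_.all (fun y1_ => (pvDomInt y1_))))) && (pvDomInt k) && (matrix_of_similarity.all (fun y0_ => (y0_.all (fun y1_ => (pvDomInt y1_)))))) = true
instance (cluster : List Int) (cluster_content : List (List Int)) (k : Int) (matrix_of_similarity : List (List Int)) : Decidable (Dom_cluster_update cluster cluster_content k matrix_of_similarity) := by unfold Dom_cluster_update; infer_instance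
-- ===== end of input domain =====

-- B precomputes every row sum of the similarity matrix once and then does a pure
-- argmax pass per cluster (A recomputes a row sum for every member occurrence);
-- equivalence is about the RETURN value (both Pythons also mutate `cluster` in place).

-- ===== PORT A =====
-- the body of A's `for i in range(k)` loop (reads cluster[i], scans the members, writes cluster[i])
def pvStepA (cluster_content : List (List Int)) (matrix_of_similarity : List (List Int)) (cl : List Int) (i : Int) : List Int :=
  let updated_parameter := PySem.List.pyGetD cl i 0
  let st := (PySem.List.pyRange 0 (PySem.List.len (PySem.List.pyGetD cluster_content i []))).foldl
    (fun (st : Int × Int) j =>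
      let transaction_number := PySem.List.pyGetD (PySem.List.pyGetD cluster_content i []) j 0
      let cur_centroid := (PySem.List.pyRange 0 (PySem.List.len matrix_of_similarity)).foldl
        (fun acc m => acc + PySem.List.pyGetD (PySem.List.pyGetD matrix_of_similarity transaction_number []) m 0) 0
      if st.1 < cur_centroid then (cur_centroid, transaction_number) else st)
    (0, updated_parameter)
  PySem.List.pySetD cl i st.2

def cluster_update (cluster : List Int) (cluster_content : List (List Int)) (k : Int) (matrix_of_similarity : List (List Int)) : List Int :=
  (PySem.List.pyRange 0 k).foldl (pvStepA cluster_content matrix_of_similarity) cluster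

-- ===== PORT B =====
def pvRowSum (n : Int) (row : List Int) : Int :=
  ((PySem.List.pyRange 0 n).map (fun m => PySem.List.pyGetD row m 0)).sum

def pvRowSums (matrix : List (List Int)) : List Int :=
  matrix.map (pvRowSum (PySem.List.len matrix))

def pvBest (rs : List Int) (members : List Int) (c : Int) : Int :=
  (members.foldl (fun (st : Int × Int) tn =>
    let s := PySem.List.pyGetD rs tn 0
    if st.2 < s then (tn, s) else st) (c, 0)).1

def cluster_update_alt (cluster : List Int) (cluster_content : List (List Int)) (k : Int) (matrix_of_similarity : List (List Int)) : List Int :=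
  let rs := pvRowSums matrix_of_similarity
  cluster.mapIdx (fun i c =>
    if (i : Int) < k then pvBest rs (PySem.List.pyGetD cluster_content (i : Int) []) c else c)

-- ===== PRECONDITION & SPEC =====
-- Pre_ additionally requires EVERY matrix row to have at least N = len(matrix) entries:
-- A only reads the rows of visited members, so A can return on a ragged matrix whose
-- short rows are never visited, while B's precompute pass raises there.
def Pre_cluster_update (cluster : List Int) (cluster_content : List (List Int)) (k : Int) (matrix_of_similarity : List (List Int)) : Prop :=
  k ≤ (cluster.length : Int) ∧ k ≤ (cluster_content.length : Int) ∧
  (∀ row ∈ matrix_of_similarity, matrix_of_similarity.length ≤ row.length) ∧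
  (∀ i ∈ PySem.List.pyRange 0 k, ∀ tn ∈ PySem.List.pyGetD cluster_content i [],
    PySem.Raise.InRange matrix_of_similarity.length tn)
instance (cluster : List Int) (cluster_content : List (List Int)) (k : Int) (matrix_of_similarity : List (List Int)) : Decidable (Pre_cluster_update cluster cluster_content k matrix_of_similarity) := by unfold Pre_cluster_update; infer_instance

def pvWitness_cluster_update : List Int × List (List Int) × Int × List (List Int) :=
  ([0, 1], [[1], [0, 1]], 2, [[1, 2], [3, 4]])

def Spec_cluster_update (cluster : List Int) (cluster_content : List (List Int)) (k : Int) (matrix_of_similarity : List (List Int)) (out : List Int) : Prop := out = cluster_update_alt cluster cluster_content k matrix_of_similarity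
instance (cluster : List Int) (cluster_content : List (List Int)) (k : Int) (matrix_of_similarity : List (List Int)) (out : List Int) : Decidable (Spec_cluster_update cluster cluster_content k matrix_of_similarity out) := by unfold Spec_cluster_update; infer_instance

-- ===== CLAIM (what is proved, stated in full; the proofs are below) =====
def Claim_equal_cluster_update : Prop := ∀ (cluster : List Int) (cluster_content : List (List Int)) (k : Int) (matrix_of_similarity : List (List Int)), Dom_cluster_update cluster cluster_content k matrix_of_similarity → Pre_cluster_update cluster cluster_content k matrix_of_similarity → Spec_cluster_update cluster cluster_content k matrix_of_similarity (cluster_update cluster cluster_content k matrix_of_similarity)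

-- ===== LEMMAS AND PROOFS =====

theorem pvRowSum_nil (n : Int) : pvRowSum n ([] : List Int) = 0 := by
  simp [pvRowSum, PySem.List.pyGetD, PySem.List.pyGet?]

-- looking up the precomputed table equals recomputing the row sum, for EVERY index
-- (out of range, both defaults collapse to 0)
theorem lookup_rowSums (matrix : List (List Int)) (tn : Int) :
    PySem.List.pyGetD (pvRowSums matrix) tn 0
      = pvRowSum (PySem.List.len matrix) (PySem.List.pyGetD matrix tn []) := by
  have h := PySem.List.pyGetD_map (pvRowSum (PySem.List.len matrix)) matrix tn []
  rw [pvRowSum_nil] at h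
  simpa [pvRowSums] using h

-- A's inner scan with state (closest, updated) equals B's scan with state (best, best_sum) swapped
theorem inner_swap (S : Int → Int) (xs : List Int) :
    ∀ (c s : Int),
      xs.foldl (fun (st : Int × Int) tn =>
          if st.1 < S tn then (S tn, tn) else st) (s, c)
        = Prod.swap (xs.foldl (fun (st : Int × Int) tn =>
            if st.2 < S tn then (tn, S tn) else st) (c, s)) := by
  induction xs with
  | nil => intro c s; rfl
  | cons x xs ih =>
      intro c s
      simp only [List.foldl_cons]
      by_cases h : s < S x
      · simp only [h, if_true]; exact ih _ _
      · simp only [h, if_false]; exact ih _ _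

-- the sequential set-loop over range(k) is the index-conditional map
theorem outer_map (g : Nat → Int → Int) (cl : List Int) :
    ∀ (m : Nat), m ≤ cl.length →
      (List.range m).foldl (fun c i => c.set i (g i (c.getD i 0))) cl
        = cl.mapIdx (fun i c => if i < m then g i c else c) := by
  intro m
  induction m with
  | zero =>
      intro _
      apply List.ext_getElem (by simp)
      intro j h1 h2
      simp [List.getElem_mapIdx]
  | succ m ih =>
      intro hm
      have hm' : m < cl.length := by omega
      rw [List.range_succ, List.foldl_append, List.foldl_cons, List.foldl_nil,
          ih (by omega)]
      have hget : (cl.mapIdx (fun i c => if i < m then g i c else c)).getD m 0 = cl[m] := by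
        rw [List.getD_eq_getElem _ _ (by simpa using hm')]
        simp [List.getElem_mapIdx]
      rw [hget]
      apply List.ext_getElem (by simp)
      intro j h1 h2
      simp only [List.getElem_set, List.getElem_mapIdx]
      by_cases hjm : m = j
      · subst hjm; simp [show m < m + 1 by omega]
      · by_cases hj : j < m
        · simp [hjm, hj, show j < m + 1 by omega]
        · simp [hjm, hj, show ¬ (j < m + 1) by omega]

-- A's loop body, at a nonnegative index, is a conditional-free set with pvBest
theorem stepA_eq (cluster_content matrix : List (List Int)) (cl : List Int) (i : Nat) :
    pvStepA cluster_content matrix cl ((0 : Int) + (i : Int))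
      = cl.set i (pvBest (pvRowSums matrix)
          (PySem.List.pyGetD cluster_content (i : Int) []) (cl.getD i 0)) := by
  unfold pvStepA
  simp only [zero_add]
  have hfold := PySem.List.foldl_pyRange_pyGetD (PySem.List.pyGetD cluster_content (i : Int) []) (0 : Int)
    (fun (st : Int × Int) tn =>
      let cur_centroid := (PySem.List.pyRange 0 (PySem.List.len matrix)).foldl
        (fun acc m => acc + PySem.List.pyGetD (PySem.List.pyGetD matrix tn []) m 0) 0
      if st.1 < cur_centroid then (cur_centroid, tn) else st)
    ((0 : Int), PySem.List.pyGetD cl (i : Int) 0) (a := 0) le_rfl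
  simp only [Int.toNat_zero, List.drop_zero] at hfold
  rw [hfold]
  have hsum : ∀ tn : Int,
      (PySem.List.pyRange 0 (PySem.List.len matrix)).foldl
        (fun acc m => acc + PySem.List.pyGetD (PySem.List.pyGetD matrix tn []) m 0) 0
      = pvRowSum (PySem.List.len matrix) (PySem.List.pyGetD matrix tn []) := by
    intro tn
    rw [PySem.List.foldl_add]
    simp [pvRowSum]
  simp only [hsum, pvBest, lookup_rowSums]
  rw [inner_swap (fun tn => pvRowSum (PySem.List.len matrix) (PySem.List.pyGetD matrix tn []))
      (PySem.List.pyGetD cluster_content (i : Int) []) (PySem.List.pyGetD cl (i : Int) 0) 0]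
  simp [PySem.List.pySetD_natCast, PySem.List.pyGetD_natCast]

theorem cluster_update_eq_alt (cluster : List Int) (cluster_content : List (List Int))
    (k : Int) (matrix_of_similarity : List (List Int))
    (hk : k ≤ (cluster.length : Int)) :
    cluster_update cluster cluster_content k matrix_of_similarity
      = cluster_update_alt cluster cluster_content k matrix_of_similarity := by
  unfold cluster_update cluster_update_alt
  rw [PySem.List.pyRange_one, List.foldl_map]
  have hfun : (fun (acc : List Int) (x : Nat) => pvStepA cluster_content matrix_of_similarity acc ((0 : Int) + (x : Int)))
      = fun (c : List Int) (i : Nat) =>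
          c.set i ((fun (i : Nat) (v : Int) => pvBest (pvRowSums matrix_of_similarity)
            (PySem.List.pyGetD cluster_content (i : Int) []) v) i (c.getD i 0)) :=
    funext fun acc => funext fun x => stepA_eq cluster_content matrix_of_similarity acc x
  rw [hfun, show k - 0 = k by ring,
      outer_map _ cluster k.toNat (by omega)]
  apply List.ext_getElem (by simp)
  intro j h1 h2
  simp only [List.getElem_mapIdx]
  have : j < k.toNat ↔ (j : Int) < k := by omega
  rw [if_congr this rfl rfl]

-- ===== VERDICT (by name: the statement is the Claim_ definition above) =====
theorem cluster_update_spec : Claim_equal_cluster_update := by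
  intro cluster cluster_content k matrix _ hpre
  unfold Spec_cluster_update
  exact cluster_update_eq_alt cluster cluster_content k matrix hpre.1
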